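-- pv_equiv track=rewrite | github.com/Ade-Pyaar/POS_Tagging_App | utils.py | assign_unk
-- ===== SOURCE A (Python) =====
-- import string, json
--
-- punct = set(string.punctuation)
--
-- noun_suffix = ["action", "age", "ance", "cy", "dom", "ee", "ence", "er", "hood", "ion", "ism", "ist", "ity", "ling", "ment", "ness", "or", "ry", "scape", "ship", "ty"]
--
-- verb_suffix = ["ate", "ify", "ise", "ize"]
--
-- adj_suffix = ["able", "ese", "ful", "i", "ian", "ible", "ic", "ish", "ive", "less", "ly", "ous"]
--
-- adv_suffix = ["ward", "wards", "wise"]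
--
-- def assign_unk(tok):
--     """
--     Assign unknown word tokens
--     """
--     # Digits
--     if any(char.isdigit() for char in tok):
--         return "--unk_digit--"
--
--     # Punctuation
--     elif any(char in punct for char in tok):
--         return "--unk_punct--"
--
--     # Upper-case
--     elif any(char.isupper() for char in tok):
--         return "--unk_upper--"
--
--     # Nouns
--     elif any(tok.endswith(suffix) for suffix in noun_suffix):
--         return "--unk_noun--"
--
--     # Verbs
--     elif any(tok.endswith(suffix) for suffix in verb_suffix):
--         return "--unk_verb--"
--
--     # Adjectives
--     elif any(tok.endswith(suffix) for suffix in adj_suffix):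
--         return "--unk_adj--"
--
--     # Adverbs
--     elif any(tok.endswith(suffix) for suffix in adv_suffix):
--         return "--unk_adv--"
--
--     return "--unk--"
-- ===== SOURCE B (Python) =====
-- import string
--
-- punct = set(string.punctuation)
--
-- noun_suffix = ["action", "age", "ance", "cy", "dom", "ee", "ence", "er", "hood", "ion", "ism", "ist", "ity", "ling", "ment", "ness", "or", "ry", "scape", "ship", "ty"]
-- verb_suffix = ["ate", "ify", "ise", "ize"]
-- adj_suffix = ["able", "ese", "ful", "i", "ian", "ible", "ic", "ish", "ive", "less", "ly", "ous"]
-- adv_suffix = ["ward", "wards", "wise"]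
--
-- # One hash map: suffix -> group priority (0 noun, 1 verb, 2 adj, 3 adv).
-- _SUFFIX_PRI = {}
-- for _i, _group in enumerate([noun_suffix, verb_suffix, adj_suffix, adv_suffix]):
--     for _s in _group:
--         _SUFFIX_PRI[_s] = _i
--
-- _GROUP_TAG = ["--unk_noun--", "--unk_verb--", "--unk_adj--", "--unk_adv--"]
-- _CHAR_TAG = {3: "--unk_digit--", 2: "--unk_punct--", 1: "--unk_upper--"}
--
--
-- def _char_pri(ch):
--     """Priority of a single character: digit > punctuation > upper-case > none."""
--     if ch.isdigit():
--         return 3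
--     if ch in punct:
--         return 2
--     if ch.isupper():
--         return 1
--     return 0
--
--
-- def assign_unk(tok):
--     """
--     Assign unknown word tokens.
--
--     Single pass keeping the maximal character priority; then, instead of
--     testing all 40 suffixes with endswith, look up the (at most 6) actual
--     tails of tok in the suffix->group hash map and keep the best group.
--     """
--     score = 0
--     for ch in tok:
--         score = max(score, _char_pri(ch))
--     if score:
--         return _CHAR_TAG[score]
--
--     best = None
--     n = len(tok)
--     for L in range(1, min(n, 6) + 1):
--         p = _SUFFIX_PRI.get(tok[n - L:])
--         if p is not None and (best is None or p < best):
--             best = p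
--     return "--unk--" if best is None else _GROUP_TAG[best]
-- ===== Notes on version B (the rewrite author's own statement) =====
-- stated objective: alternative
-- what changed: B replaces A's three any()-scans by a single pass keeping the maximum per-character priority, and replaces the four endswith-over-40-suffixes branches by enumerating the at most 6 actual tails of tok and looking each up in a precomputed suffix-to-group hash map, keeping the minimum group priority.
import Mathlib
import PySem

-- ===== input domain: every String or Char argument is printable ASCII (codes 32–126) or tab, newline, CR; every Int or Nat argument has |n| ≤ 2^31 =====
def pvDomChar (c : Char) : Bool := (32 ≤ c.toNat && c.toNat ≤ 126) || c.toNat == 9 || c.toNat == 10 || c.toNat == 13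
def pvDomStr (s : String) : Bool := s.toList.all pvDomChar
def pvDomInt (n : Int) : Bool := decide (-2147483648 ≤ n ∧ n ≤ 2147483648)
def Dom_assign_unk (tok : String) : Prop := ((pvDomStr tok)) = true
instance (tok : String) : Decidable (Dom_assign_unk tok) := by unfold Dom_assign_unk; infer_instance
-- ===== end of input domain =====

-- B replaces A's three any() scans by one running-maximum pass over character priorities, and the
-- four endswith-over-all-40-suffixes branches by looking tok's at most 6 actual tails up in a
-- precomputed suffix→group map, keeping the minimal group priority (objective: alternative algorithm).

-- ===== PORT A =====
def punctList : List Char := "!\"#$%&'()*+,-./:;<=>?@[\\]^_`{|}~".toList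

def noun_suffix : List String := ["action", "age", "ance", "cy", "dom", "ee", "ence", "er", "hood", "ion", "ism", "ist", "ity", "ling", "ment", "ness", "or", "ry", "scape", "ship", "ty"]
def verb_suffix : List String := ["ate", "ify", "ise", "ize"]
def adj_suffix : List String := ["able", "ese", "ful", "i", "ian", "ible", "ic", "ish", "ive", "less", "ly", "ous"]
def adv_suffix : List String := ["ward", "wards", "wise"]

def assign_unk (tok : String) : String :=
  if tok.toList.any (fun c => PySem.Chars.isdigit c) then "--unk_digit--"
  else if tok.toList.any (fun c => punctList.contains c) then "--unk_punct--"
  else if tok.toList.any (fun c => PySem.Chars.isupper c) then "--unk_upper--"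
  else if noun_suffix.any (fun suf => PySem.Str.endswith tok suf) then "--unk_noun--"
  else if verb_suffix.any (fun suf => PySem.Str.endswith tok suf) then "--unk_verb--"
  else if adj_suffix.any (fun suf => PySem.Str.endswith tok suf) then "--unk_adj--"
  else if adv_suffix.any (fun suf => PySem.Str.endswith tok suf) then "--unk_adv--"
  else "--unk--"

-- ===== PORT B =====
-- module-level table building of Source B: one dict suffix -> group priority
def suffixGroupsB : List (List String) := [noun_suffix, verb_suffix, adj_suffix, adv_suffix]

def suffixPriB : PySem.Dict String Int :=
  (PySem.List.enumerate suffixGroupsB 0).foldl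
    (fun d ig => ig.2.foldl (fun d' s => d'.insert s ig.1) d) PySem.Dict.empty

def groupTagB : List String := ["--unk_noun--", "--unk_verb--", "--unk_adj--", "--unk_adv--"]

def charTagB : PySem.Dict Int String :=
  PySem.Dict.ofList [(3, "--unk_digit--"), (2, "--unk_punct--"), (1, "--unk_upper--")]

-- Source B's helper _char_pri
def charPriB (c : Char) : Int :=
  if PySem.Chars.isdigit c then 3
  else if punctList.contains c then 2
  else if PySem.Chars.isupper c then 1
  else 0

-- the 'score = max(score, _char_pri(ch))' loop of Source B
def scoreB (cs : List Char) : Int := cs.foldl (fun s c => max s (charPriB c)) 0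

-- loop body of Source B's tail loop; tok[n-L:] is ported as drop (n-L).toNat, exact here since 0 ≤ n-L ≤ n for every L the range yields
def tailStep (cs : List Char) (n : Int) (best : Option Int) (L : Int) : Option Int :=
  match suffixPriB.get? (String.ofList (cs.drop (n - L).toNat)) with
  | none => best
  | some p => match best with
              | none => some p
              | some b => if p < b then some p else some b

-- the 'for L in range(1, min(n, 6) + 1)' loop of Source B
def bestB (tok : String) : Option Int :=
  (PySem.List.pyRange 1 (min (PySem.Str.len tok) 6 + 1) 1).foldl
    (tailStep tok.toList (PySem.Str.len tok)) none

def assign_unk_alt (tok : String) : String :=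
  let score := scoreB tok.toList
  if score ≠ 0 then (charTagB.get? score).getD ""       -- _CHAR_TAG[score]; KeyError unreachable (score ∈ {1,2,3})
  else
    match bestB tok with
    | none => "--unk--"
    | some b => (PySem.List.pyGet? groupTagB b).getD "" -- _GROUP_TAG[best]; IndexError unreachable (best ∈ {0,1,2,3})

-- ===== PRECONDITION & SPEC =====
def Spec_assign_unk (tok : String) (out : String) : Prop := out = assign_unk_alt tok
instance (tok : String) (out : String) : Decidable (Spec_assign_unk tok out) := by unfold Spec_assign_unk; infer_instance

-- ===== CLAIM (what is proved, stated in full; the proofs are below) =====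
def Claim_equal_assign_unk : Prop := ∀ (tok : String), Dom_assign_unk tok → Spec_assign_unk tok (assign_unk tok)

-- ===== LEMMAS AND PROOFS =====

-- ---- character stage ----
theorem charPriB_bounds (c : Char) : 0 ≤ charPriB c ∧ charPriB c ≤ 3 := by
  unfold charPriB; split_ifs <;> norm_num

theorem scoreB_eq_map (cs : List Char) : scoreB cs = (cs.map charPriB).foldl max 0 := by
  simp [scoreB, List.foldl_map]

theorem scoreB_le (cs : List Char) (k : Int) (hk : 0 ≤ k)
    (h : ∀ c ∈ cs, charPriB c ≤ k) : scoreB cs ≤ k := by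
  rw [scoreB_eq_map]
  rcases PySem.List.foldl_max_mem (cs.map charPriB) 0 with h0 | hm
  · omega
  · obtain ⟨c, hc, hc'⟩ := List.mem_map.mp hm
    rw [← hc']; exact h c hc

theorem le_scoreB (cs : List Char) (c : Char) (hc : c ∈ cs) : charPriB c ≤ scoreB cs := by
  rw [scoreB_eq_map]
  exact (PySem.List.le_foldl_max (cs.map charPriB) 0).2 _ (List.mem_map_of_mem hc)

theorem scoreB_nonneg (cs : List Char) : 0 ≤ scoreB cs := by
  rw [scoreB_eq_map]; exact (PySem.List.le_foldl_max (cs.map charPriB) 0).1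

-- ---- suffix stage: the fold is a minimum over the matched priorities ----
def ominP (b : Option Int) (p : Int) : Option Int :=
  some (match b with | none => p | some b' => min b' p)

def fgetB (cs : List Char) (n : Int) (L : Int) : Option Int :=
  suffixPriB.get? (String.ofList (cs.drop (n - L).toNat))

set_option maxRecDepth 100000 in
theorem tailStep_eq_filterMap (cs : List Char) (n : Int) :
    ∀ (ls : List Int) (b : Option Int),
      ls.foldl (tailStep cs n) b = (ls.filterMap (fgetB cs n)).foldl ominP b := by
  intro ls
  induction ls with
  | nil => intro b; rfl
  | cons L t ih =>
      intro b
      simp only [List.foldl_cons, List.filterMap_cons]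
      have hstep : tailStep cs n b L =
          (match fgetB cs n L with | none => b | some p => ominP b p) := by
        unfold tailStep fgetB ominP
        rcases suffixPriB.get? (String.ofList (cs.drop (n - L).toNat)) with _ | p
        · rfl
        · rcases b with _ | b'
          · rfl
          · show (if p < b' then some p else some b') = some (min b' p)
            split_ifs with hpb
            · have hmin : min b' p = p := by omega
              rw [hmin]
            · have hmin : min b' p = b' := by omega
              rw [hmin]
      rcases h : fgetB cs n L with _ | p
      · rw [h] at hstep; simp only [hstep, ih]
      · rw [h] at hstep; simp only [hstep, List.foldl_cons, ih]

theorem foldl_ominP_some (ms : List Int) : ∀ b : Int, ms.foldl ominP (some b) = some (ms.foldl min b) := by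
  induction ms with
  | nil => intro b; rfl
  | cons x t ih => intro b; simpa [ominP] using ih (min b x)

theorem ominP_spec (ms : List Int) (hne : ms ≠ []) :
    ∃ m, ms.foldl ominP none = some m ∧ m ∈ ms ∧ ∀ p ∈ ms, m ≤ p := by
  rcases ms with _ | ⟨x, t⟩
  · exact absurd rfl hne
  · refine ⟨t.foldl min x, ?_, ?_, ?_⟩
    · simpa [ominP] using foldl_ominP_some t x
    · rcases PySem.List.foldl_min_mem t x with h | h
      · rw [h]; exact List.mem_cons_self
      · exact List.mem_cons_of_mem _ h
    · intro p hp
      rcases List.mem_cons.mp hp with h | h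
      · rw [h]; exact (PySem.List.foldl_min_le t x).1
      · exact (PySem.List.foldl_min_le t x).2 p h

theorem ominP_nil : ([] : List Int).foldl ominP none = none := rfl

-- ---- literal facts about the suffix table (all by decide) ----
set_option maxRecDepth 100000 in
theorem suffixPriB_nodup : suffixPriB.keys.Nodup := by decide

set_option maxRecDepth 100000 in
theorem suffixPriB_items_char : ∀ x ∈ suffixPriB.items,
    (x.2 = 0 → x.1 ∈ noun_suffix) ∧ (x.2 = 1 → x.1 ∈ verb_suffix) ∧
    (x.2 = 2 → x.1 ∈ adj_suffix) ∧ (x.2 = 3 → x.1 ∈ adv_suffix) ∧ 0 ≤ x.2 ∧ x.2 ≤ 3 := by decide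

set_option maxRecDepth 100000 in
theorem noun_items : ∀ s ∈ noun_suffix, (s, (0 : Int)) ∈ suffixPriB.items := by decide
set_option maxRecDepth 100000 in
theorem verb_items : ∀ s ∈ verb_suffix, (s, (1 : Int)) ∈ suffixPriB.items := by decide
set_option maxRecDepth 100000 in
theorem adj_items : ∀ s ∈ adj_suffix, (s, (2 : Int)) ∈ suffixPriB.items := by decide
set_option maxRecDepth 100000 in
theorem adv_items : ∀ s ∈ adv_suffix, (s, (3 : Int)) ∈ suffixPriB.items := by decide

theorem noun_len : ∀ s ∈ noun_suffix, 1 ≤ s.toList.length ∧ s.toList.length ≤ 6 := by decide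
theorem verb_len : ∀ s ∈ verb_suffix, 1 ≤ s.toList.length ∧ s.toList.length ≤ 6 := by decide
theorem adj_len : ∀ s ∈ adj_suffix, 1 ≤ s.toList.length ∧ s.toList.length ≤ 6 := by decide
theorem adv_len : ∀ s ∈ adv_suffix, 1 ≤ s.toList.length ∧ s.toList.length ≤ 6 := by decide

-- the matched-priority list of Source B's tail loop
def matchedB (tok : String) : List Int :=
  (PySem.List.pyRange 1 (min ((tok.toList.length : Int)) 6 + 1) 1).filterMap
    (fgetB tok.toList (tok.toList.length : Int))

theorem bestB_eq (tok : String) : bestB tok = (matchedB tok).foldl ominP none := by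
  unfold bestB matchedB
  rw [PySem.Str.len_eq]
  exact tailStep_eq_filterMap _ _ _ _

theorem matchedB_bounds (tok : String) : ∀ p ∈ matchedB tok, 0 ≤ p ∧ p ≤ 3 := by
  intro p hp
  obtain ⟨L, _, hL⟩ := List.mem_filterMap.mp hp
  have := suffixPriB_items_char _ (PySem.Dict.mem_items_of_get?_eq_some _ hL)
  exact ⟨this.2.2.2.2.1, this.2.2.2.2.2⟩

-- a group's priority appears among the matched tails iff some suffix of the group matches tok
theorem group_link (tok : String) (g : List String) (i : Int)
    (hfwd : ∀ x ∈ suffixPriB.items, x.2 = i → x.1 ∈ g)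
    (hbwd : ∀ s ∈ g, (s, i) ∈ suffixPriB.items)
    (hlen : ∀ s ∈ g, 1 ≤ s.toList.length ∧ s.toList.length ≤ 6) :
    i ∈ matchedB tok ↔ g.any (fun suf => PySem.Str.endswith tok suf) = true := by
  constructor
  · intro hi
    obtain ⟨L, hLmem, hL⟩ := List.mem_filterMap.mp hi
    have hmem : String.ofList (tok.toList.drop (((tok.toList.length : Int)) - L).toNat) ∈ g := by
      exact hfwd _ (PySem.Dict.mem_items_of_get?_eq_some _ hL) rfl
    refine List.any_eq_true.mpr ⟨_, hmem, ?_⟩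
    rw [PySem.Str.endswith_eq, PySem.Chars.endswith_iff, String.toList_ofList]
    exact List.drop_suffix _ _
  · intro hany
    obtain ⟨suf, hsuf, hend⟩ := List.any_eq_true.mp hany
    rw [PySem.Str.endswith_eq, PySem.Chars.endswith_iff] at hend
    have hdrop : suf.toList = tok.toList.drop (tok.toList.length - suf.toList.length) :=
      List.suffix_iff_eq_drop.mp hend
    have hlsuf := hlen suf hsuf
    have hle : suf.toList.length ≤ tok.toList.length := hend.length_le
    refine List.mem_filterMap.mpr ⟨(suf.toList.length : Int), ?_, ?_⟩
    · rw [PySem.List.mem_pyRange_one]; omega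
    · unfold fgetB
      have : (((tok.toList.length : Int)) - (suf.toList.length : Int)).toNat =
          tok.toList.length - suf.toList.length := by omega
      rw [this, ← hdrop, String.ofList_toList]
      exact (PySem.Dict.get?_eq_some_iff_mem_items _ _ _ suffixPriB_nodup).mpr (hbwd suf hsuf)

-- ===== VERDICT (by name: the statement is the Claim_ definition above) =====
theorem assign_unk_spec : Claim_equal_assign_unk := by
  intro tok _
  unfold Spec_assign_unk assign_unk assign_unk_alt
  by_cases hd : tok.toList.any (fun c => PySem.Chars.isdigit c) = true
  · obtain ⟨c, hc, hc'⟩ := List.any_eq_true.mp hd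
    have h3 : scoreB tok.toList = 3 := by
      have h1 : (3 : Int) ≤ scoreB tok.toList := by
        have := le_scoreB tok.toList c hc
        rwa [charPriB, if_pos hc'] at this
      have h2 := scoreB_le tok.toList 3 (by norm_num) (fun c _ => (charPriB_bounds c).2)
      omega
    simp only [hd, if_true, h3]
    rfl
  · have hdall : ∀ c ∈ tok.toList, PySem.Chars.isdigit c = false := by
      intro c hc
      by_contra h
      exact hd (List.any_eq_true.mpr ⟨c, hc, by simpa using h⟩)
    simp only [hd]
    by_cases hp : tok.toList.any (fun c => punctList.contains c) = true
    · obtain ⟨c, hc, hc'⟩ := List.any_eq_true.mp hp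
      have h2 : scoreB tok.toList = 2 := by
        have h1 : (2 : Int) ≤ scoreB tok.toList := by
          have := le_scoreB tok.toList c hc
          rwa [charPriB, if_neg (by rw [hdall c hc]; simp), if_pos hc'] at this
        have hub := scoreB_le tok.toList 2 (by norm_num) (fun c hc => by
          rw [charPriB, if_neg (by rw [hdall c hc]; simp)]
          split_ifs <;> norm_num)
        omega
      simp only [hp, if_true, h2]
      rfl
    · have hpall : ∀ c ∈ tok.toList, punctList.contains c = false := by
        intro c hc
        by_contra h
        exact hp (List.any_eq_true.mpr ⟨c, hc, by simpa using h⟩)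
      simp only [hp]
      by_cases hu : tok.toList.any (fun c => PySem.Chars.isupper c) = true
      · obtain ⟨c, hc, hc'⟩ := List.any_eq_true.mp hu
        have h1' : scoreB tok.toList = 1 := by
          have h1 : (1 : Int) ≤ scoreB tok.toList := by
            have := le_scoreB tok.toList c hc
            rwa [charPriB, if_neg (by rw [hdall c hc]; simp), if_neg (by rw [hpall c hc]; simp),
              if_pos hc'] at this
          have hub := scoreB_le tok.toList 1 (by norm_num) (fun c hc => by
            rw [charPriB, if_neg (by rw [hdall c hc]; simp), if_neg (by rw [hpall c hc]; simp)]
            split_ifs <;> norm_num)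
          omega
        simp only [hu, if_true, h1']
        rfl
      · -- no digit / punct / upper: score is 0, B goes to the tail loop
        have huall : ∀ c ∈ tok.toList, PySem.Chars.isupper c = false := by
          intro c hc
          by_contra h
          exact hu (List.any_eq_true.mpr ⟨c, hc, by simpa using h⟩)
        have h0 : scoreB tok.toList = 0 := by
          have hub := scoreB_le tok.toList 0 le_rfl (fun c hc => by
            rw [charPriB, if_neg (by rw [hdall c hc]; simp), if_neg (by rw [hpall c hc]; simp),
              if_neg (by rw [huall c hc]; simp)])
          have := scoreB_nonneg tok.toList
          omega
        simp only [hu, if_false, h0, ne_eq, not_true_eq_false, if_false]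
        -- suffix cascade
        have hn_iff := group_link tok noun_suffix 0
          (fun x hx h => ((suffixPriB_items_char x hx).1) h) noun_items noun_len
        have hv_iff := group_link tok verb_suffix 1
          (fun x hx h => ((suffixPriB_items_char x hx).2.1) h) verb_items verb_len
        have ha_iff := group_link tok adj_suffix 2
          (fun x hx h => ((suffixPriB_items_char x hx).2.2.1) h) adj_items adj_len
        have hw_iff := group_link tok adv_suffix 3
          (fun x hx h => ((suffixPriB_items_char x hx).2.2.2.1) h) adv_items adv_len
        rw [bestB_eq]
        by_cases hn : noun_suffix.any (fun suf => PySem.Str.endswith tok suf) = true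
        · obtain ⟨m, hm, hmem, hmin⟩ := ominP_spec (matchedB tok)
            (List.ne_nil_of_mem (hn_iff.mpr hn))
          have hm0 : m = 0 := by
            have := hmin 0 (hn_iff.mpr hn)
            have := (matchedB_bounds tok m hmem).1
            omega
          simp only [hn, if_true, hm, hm0]
          rfl
        · simp only [hn]
          by_cases hv : verb_suffix.any (fun suf => PySem.Str.endswith tok suf) = true
          · obtain ⟨m, hm, hmem, hmin⟩ := ominP_spec (matchedB tok)
              (List.ne_nil_of_mem (hv_iff.mpr hv))
            have hm1 : m = 1 := by
              have hle := hmin 1 (hv_iff.mpr hv)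
              have hb := (matchedB_bounds tok m hmem).1
              have hne0 : m ≠ 0 := fun h => hn (hn_iff.mp (h ▸ hmem))
              omega
            simp only [hv, if_true, hm, hm1]
            rfl
          · simp only [hv]
            by_cases ha : adj_suffix.any (fun suf => PySem.Str.endswith tok suf) = true
            · obtain ⟨m, hm, hmem, hmin⟩ := ominP_spec (matchedB tok)
                (List.ne_nil_of_mem (ha_iff.mpr ha))
              have hm2 : m = 2 := by
                have hle := hmin 2 (ha_iff.mpr ha)
                have hb := (matchedB_bounds tok m hmem).1
                have hne0 : m ≠ 0 := fun h => hn (hn_iff.mp (h ▸ hmem))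
                have hne1 : m ≠ 1 := fun h => hv (hv_iff.mp (h ▸ hmem))
                omega
              simp only [ha, if_true, hm, hm2]
              rfl
            · simp only [ha]
              by_cases hw : adv_suffix.any (fun suf => PySem.Str.endswith tok suf) = true
              · obtain ⟨m, hm, hmem, hmin⟩ := ominP_spec (matchedB tok)
                  (List.ne_nil_of_mem (hw_iff.mpr hw))
                have hm3 : m = 3 := by
                  have hle := hmin 3 (hw_iff.mpr hw)
                  have hb := (matchedB_bounds tok m hmem)
                  have hne0 : m ≠ 0 := fun h => hn (hn_iff.mp (h ▸ hmem))
                  have hne1 : m ≠ 1 := fun h => hv (hv_iff.mp (h ▸ hmem))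
                  have hne2 : m ≠ 2 := fun h => ha (ha_iff.mp (h ▸ hmem))
                  omega
                simp only [hw, if_true, hm, hm3]
                rfl
              · -- nothing matches: matchedB is empty
                have hempty : matchedB tok = [] := by
                  rcases hlist : matchedB tok with _ | ⟨p, t⟩
                  · rfl
                  · exfalso
                    have hpm : p ∈ matchedB tok := by rw [hlist]; exact List.mem_cons_self
                    obtain ⟨hb1, hb2⟩ := matchedB_bounds tok p hpm
                    interval_cases p
                    · exact hn (hn_iff.mp hpm)
                    · exact hv (hv_iff.mp hpm)
                    · exact ha (ha_iff.mp hpm)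
                    · exact hw (hw_iff.mp hpm)
                simp only [hw, hempty, ominP_nil]
                rfl
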